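-- pv_equiv track=rewrite | github.com/jimmy-academia/dev-ADDM | src/addm/methods/amos/phase2_atkd.py | _build_phrase_groups
-- ===== SOURCE A (Python) =====
-- from typing import Any, Dict, Iterable, List, Optional, Tuple
--
-- def _build_phrase_groups(phrase_lists: List[List[str]], max_groups: int = 3) -> List[List[str]]:
--     if not phrase_lists:
--         return []
--     max_len = max((len(lst) for lst in phrase_lists if lst), default=0)
--     if max_len == 0:
--         return []
--     groups: List[List[str]] = []
--     for i in range(min(max_groups, max_len)):
--         group: List[str] = []
--         for lst in phrase_lists:
--             if not lst:
--                 continue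
--             group.append(lst[i % len(lst)])
--         if group:
--             groups.append(group)
--     return groups
-- ===== SOURCE B (Python) =====
-- from typing import List
--
-- def _build_phrase_groups(phrase_lists: List[List[str]], max_groups: int = 3) -> List[List[str]]:
--     if not phrase_lists:
--         return []
--     max_len = max((len(lst) for lst in phrase_lists if lst), default=0)
--     if max_len == 0:
--         return []
--     n = min(max_groups, max_len)
--     cols = [[lst[i % len(lst)] for i in range(n)] for lst in phrase_lists if lst]
--     return [list(t) for t in zip(*cols)]
-- ===== Notes on version B (the rewrite author's own statement) =====
-- stated objective: alternative
-- what changed: Builds each non-empty list's cyclic column once and assembles the groups by transposing (zip(*cols)), replacing A's group-major nested loop that re-scans phrase_lists for every group.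
import Mathlib
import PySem

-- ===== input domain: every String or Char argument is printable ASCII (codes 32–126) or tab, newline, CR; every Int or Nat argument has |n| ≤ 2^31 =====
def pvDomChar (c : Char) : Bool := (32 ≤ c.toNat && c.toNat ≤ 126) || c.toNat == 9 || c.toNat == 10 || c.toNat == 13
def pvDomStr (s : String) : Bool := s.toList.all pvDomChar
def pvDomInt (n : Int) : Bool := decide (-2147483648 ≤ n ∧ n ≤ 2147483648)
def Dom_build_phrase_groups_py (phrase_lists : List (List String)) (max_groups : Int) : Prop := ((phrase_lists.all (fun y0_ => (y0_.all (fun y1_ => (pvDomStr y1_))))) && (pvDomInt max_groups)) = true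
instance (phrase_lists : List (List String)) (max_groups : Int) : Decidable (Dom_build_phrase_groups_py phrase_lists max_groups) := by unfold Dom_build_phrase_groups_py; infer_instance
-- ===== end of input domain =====

-- B builds each non-empty list's cyclic column once and assembles the groups by a
-- transposition pass (zip(*cols)) instead of A's group-major nested loop; objective: alternative.

-- ===== PORT A =====
def build_phrase_groups_py (phrase_lists : List (List String)) (max_groups : Int) : List (List String) :=
  if phrase_lists.isEmpty then []
  else
    let max_len : Int :=
      PySem.List.maxD ((phrase_lists.filter (fun lst => !lst.isEmpty)).map (fun lst => (lst.length : Int))) id 0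
    if max_len = 0 then []
    else
      (PySem.List.pyRange 0 (min max_groups max_len) 1).foldl (fun groups i =>
        let group : List String := phrase_lists.foldl (fun g lst =>
          if lst.isEmpty then g
          else g ++ [PySem.List.pyGetD lst (PySem.Int.mod i (lst.length : Int)) ""]) []
        if group.isEmpty then groups else groups ++ [group]) []

-- ===== PORT B =====
-- zip(*cols): take heads while every list is non-empty, recurse on the tails
def pvZipStar (cols : List (List String)) : List (List String) :=
  if h : cols.isEmpty || cols.any List.isEmpty then []
  else
    (cols.map (fun c => c.headD "")) :: pvZipStar (cols.map List.tail)
termination_by (cols.map List.length).sum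
decreasing_by
  simp only [Bool.or_eq_true, List.isEmpty_iff, List.any_eq_true, not_or, not_exists] at h
  obtain ⟨hne, hall⟩ := h
  cases cols with
  | nil => exact absurd rfl hne
  | cons c cs =>
    have hc : c ≠ [] := fun hceq => hall c ⟨by simp, by simpa using hceq⟩
    have hlen : c.tail.length < c.length := by
      cases c with
      | nil => exact absurd rfl hc
      | cons a as => simp
    have hsum : ∀ (ds : List (List String)), ((ds.map (fun x => x.tail.length)).sum ≤ (ds.map List.length).sum) := by
      intro ds
      induction ds with
      | nil => simp
      | cons d ds ih =>
        have : d.tail.length ≤ d.length := by cases d <;> simp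
        simp only [List.map_cons, List.sum_cons]; omega
    have h2 := hsum cs
    simp only [List.map_map, Function.comp_def, List.attach_map_val, List.map_cons, List.sum_cons]
    omega

def build_phrase_groups_py_alt (phrase_lists : List (List String)) (max_groups : Int) : List (List String) :=
  if phrase_lists.isEmpty then []
  else
    let max_len : Int :=
      PySem.List.maxD ((phrase_lists.filter (fun lst => !lst.isEmpty)).map (fun lst => (lst.length : Int))) id 0
    if max_len = 0 then []
    else
      let n := min max_groups max_len
      let cols := (phrase_lists.filter (fun lst => !lst.isEmpty)).map (fun lst =>
        (PySem.List.pyRange 0 n 1).map (fun i => PySem.List.pyGetD lst (PySem.Int.mod i (lst.length : Int)) ""))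
      pvZipStar cols

-- ===== PRECONDITION & SPEC =====
def Spec_build_phrase_groups_py (phrase_lists : List (List String)) (max_groups : Int) (out : List (List String)) : Prop := out = build_phrase_groups_py_alt phrase_lists max_groups
instance (phrase_lists : List (List String)) (max_groups : Int) (out : List (List String)) : Decidable (Spec_build_phrase_groups_py phrase_lists max_groups out) := by unfold Spec_build_phrase_groups_py; infer_instance

-- ===== CLAIM (what is proved, stated in full; the proofs are below) =====
def Claim_equal_build_phrase_groups_py : Prop := ∀ (phrase_lists : List (List String)) (max_groups : Int), Dom_build_phrase_groups_py phrase_lists max_groups → Spec_build_phrase_groups_py phrase_lists max_groups (build_phrase_groups_py phrase_lists max_groups)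

-- ===== LEMMAS AND PROOFS =====

-- zip(*(map col F)) is the transpose: row-major map over R, provided F ≠ [] (or R = [])
theorem pvZipStar_map_map (g : List String → Int → String) :
    ∀ (R : List Int) (F : List (List String)), F ≠ [] →
      pvZipStar (F.map (fun lst => R.map (g lst))) = R.map (fun i => F.map (fun lst => g lst i)) := by
  intro R
  induction R with
  | nil =>
    intro F hF
    unfold pvZipStar
    cases F with
    | nil => simp at hF
    | cons c cs => simp
  | cons i R' ih =>
    intro F hF
    unfold pvZipStar
    have hne : ¬ (F.map (fun lst => (i :: R').map (g lst))).isEmpty := by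
      cases F with
      | nil => simp at hF
      | cons c cs => simp
    have hany : ¬ (F.map (fun lst => (i :: R').map (g lst))).any List.isEmpty := by
      simp
    rw [dif_neg (by simp_all)]
    simp only [List.map_map, Function.comp_def, List.map_cons, List.tail_cons, List.headD_cons]
    rw [ih F hF]

-- the inner loop of A is a map over the non-empty lists
theorem inner_fold_eq_map (phrase_lists : List (List String)) (i : Int) :
    phrase_lists.foldl (fun g lst =>
      if lst.isEmpty then g
      else g ++ [PySem.List.pyGetD lst (PySem.Int.mod i (lst.length : Int)) ""]) []
    = (phrase_lists.filter (fun lst => !lst.isEmpty)).map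
        (fun lst => PySem.List.pyGetD lst (PySem.Int.mod i (lst.length : Int)) "") := by
  have hfun : (fun (g : List String) (lst : List String) =>
      if lst.isEmpty then g
      else g ++ [PySem.List.pyGetD lst (PySem.Int.mod i (lst.length : Int)) ""])
    = (fun g lst => if (!lst.isEmpty) = true
        then g ++ [PySem.List.pyGetD lst (PySem.Int.mod i (lst.length : Int)) ""] else g) := by
    funext g lst; cases h : lst.isEmpty <;> simp
  rw [hfun, PySem.List.foldl_append_if]
  simp

-- if max over the filtered lengths is non-zero, the filter is non-empty
theorem filter_ne_nil_of_maxD_ne_zero (phrase_lists : List (List String))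
    (h : PySem.List.maxD ((phrase_lists.filter (fun lst => !lst.isEmpty)).map (fun lst => (lst.length : Int))) id 0 ≠ 0) :
    phrase_lists.filter (fun lst => !lst.isEmpty) ≠ [] := by
  intro hnil
  rw [hnil] at h
  simp [PySem.List.maxD, PySem.List.max?] at h

-- ===== VERDICT (by name: the statement is the Claim_ definition above) =====
theorem build_phrase_groups_py_spec : Claim_equal_build_phrase_groups_py := by
  intro phrase_lists max_groups _
  unfold Spec_build_phrase_groups_py build_phrase_groups_py build_phrase_groups_py_alt
  by_cases h0 : phrase_lists.isEmpty
  · simp [h0]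
  · rw [if_neg h0, if_neg h0]
    set max_len : Int :=
      PySem.List.maxD ((phrase_lists.filter (fun lst => !lst.isEmpty)).map (fun lst => (lst.length : Int))) id 0 with hml
    by_cases hm : max_len = 0
    · simp [hm]
    · rw [if_neg hm, if_neg hm]
      have hF : phrase_lists.filter (fun lst => !lst.isEmpty) ≠ [] :=
        filter_ne_nil_of_maxD_ne_zero phrase_lists (hml ▸ hm)
      rw [pvZipStar_map_map (fun lst i => PySem.List.pyGetD lst (PySem.Int.mod i (lst.length : Int)) "")
          (PySem.List.pyRange 0 (min max_groups max_len) 1) _ hF]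
      -- now the A side: each row is non-empty, so the guard in the outer fold never drops a row
      have hrow : ∀ i : Int,
          (phrase_lists.foldl (fun g lst =>
            if lst.isEmpty then g
            else g ++ [PySem.List.pyGetD lst (PySem.Int.mod i (lst.length : Int)) ""]) []) =
          (phrase_lists.filter (fun lst => !lst.isEmpty)).map
            (fun lst => PySem.List.pyGetD lst (PySem.Int.mod i (lst.length : Int)) "") :=
        fun i => inner_fold_eq_map phrase_lists i
      have hfun : (fun (groups : List (List String)) (i : Int) =>
          let group : List String := phrase_lists.foldl (fun g lst =>
            if lst.isEmpty then g
            else g ++ [PySem.List.pyGetD lst (PySem.Int.mod i (lst.length : Int)) ""]) []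
          if group.isEmpty then groups else groups ++ [group])
        = (fun groups i => groups ++
            [(phrase_lists.filter (fun lst => !lst.isEmpty)).map
              (fun lst => PySem.List.pyGetD lst (PySem.Int.mod i (lst.length : Int)) "")]) := by
        funext groups i
        simp only [hrow i]
        rw [if_neg (by simp [List.isEmpty_iff, hF])]
      rw [hfun, PySem.List.foldl_append_singleton_eq_map]
      simp
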